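-- pv_equiv track=rewrite | github.com/gobeul/Baekjoon | problems/2579_inggg.py | FinD
-- ===== SOURCE A (Python) =====
-- def FinD(arr): # s가 1인 친구에서 가장 큰 놈, 2인 친구에서 가장 큰놈을 뽑아주자
--     one = []
--     two = []
--     for s, p in arr :
--         if s == 1:
--             one.append((s,p))
--         else:
--             two.append((s,p))
--     s1, p1 = max(one, key=lambda x : x[1])
--     s2, p2 = max(two, key=lambda x : x[1])
--     return s1, p1, s2, p2
-- ===== SOURCE B (Python) =====
-- def FinD(arr):
--     best1 = None
--     best2 = None
--     for s, p in arr: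
--         if s == 1:
--             if best1 is None or p > best1[1]:
--                 best1 = (s, p)
--         else:
--             if best2 is None or p > best2[1]:
--                 best2 = (s, p)
--     if best1 is None or best2 is None:
--         raise ValueError("a group is empty")
--     s1, p1 = best1
--     s2, p2 = best2
--     return s1, p1, s2, p2
-- ===== Notes on version B (the rewrite author's own statement) =====
-- stated objective: alternative
-- what changed: Single pass keeping two running winners with strict-> updates instead of partitioning into two lists and calling max(key=...) on each; trades the two intermediate lists for O(1) extra state.
import Mathlib
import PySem

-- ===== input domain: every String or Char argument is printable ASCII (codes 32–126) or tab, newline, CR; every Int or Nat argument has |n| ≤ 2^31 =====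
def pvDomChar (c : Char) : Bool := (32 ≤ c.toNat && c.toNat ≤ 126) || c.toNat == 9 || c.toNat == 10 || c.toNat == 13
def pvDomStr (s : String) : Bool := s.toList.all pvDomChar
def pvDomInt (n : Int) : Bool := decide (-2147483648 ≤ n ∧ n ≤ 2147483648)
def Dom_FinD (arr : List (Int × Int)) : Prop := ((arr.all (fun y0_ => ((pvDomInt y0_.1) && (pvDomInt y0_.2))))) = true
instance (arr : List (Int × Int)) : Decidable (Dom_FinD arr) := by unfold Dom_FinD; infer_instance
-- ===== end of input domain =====

-- B replaces A's partition-into-two-lists-then-max(key) with one pass keeping two running winners (strict-> update): no intermediate lists.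
-- ===== PORT A =====
def FinD (arr : List (Int × Int)) : Int × Int × Int × Int :=
  -- one loop appending each (s,p) to `one` if s == 1 else to `two`
  let ot := arr.foldl
    (fun (acc : List (Int × Int) × List (Int × Int)) x =>
      if x.1 = 1 then (acc.1 ++ [x], acc.2) else (acc.1, acc.2 ++ [x]))
    ([], [])
  -- max(one, key=lambda x: x[1]); max(two, key=...): ValueError on an empty group, excluded by Pre_
  match PySem.List.max? ot.1 (fun x => x.2), PySem.List.max? ot.2 (fun x => x.2) with
  | some (s1, p1), some (s2, p2) => (s1, p1, s2, p2)
  | _, _ => (0, 0, 0, 0)   -- unreachable under Pre_FinD (Python raises ValueError)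

-- ===== PORT B =====
-- one step of B's running-winner update: keep m unless the new price is strictly greater
def bStep (b : Option (Int × Int)) (x : Int × Int) : Option (Int × Int) :=
  match b with
  | none => some x
  | some m => if m.2 < x.2 then some x else some m

def FinD_alt (arr : List (Int × Int)) : Int × Int × Int × Int :=
  let st := arr.foldl
    (fun (st : Option (Int × Int) × Option (Int × Int)) x =>
      if x.1 = 1 then (bStep st.1 x, st.2) else (st.1, bStep st.2 x))
    (none, none)
  match st.1 with
  | none => (0, 0, 0, 0)       -- B raises ValueError here, excluded by Pre_FinD
  | some b1 =>
    match st.2 with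
    | none => (0, 0, 0, 0)     -- likewise excluded by Pre_FinD
    | some b2 => (b1.1, b1.2, b2.1, b2.2)

-- ===== PRECONDITION & SPEC =====
-- Pre_: both groups nonempty; on its complement Python A raises ValueError (max of an empty sequence).
def Pre_FinD (arr : List (Int × Int)) : Prop :=
  (∃ x ∈ arr, x.1 = 1) ∧ (∃ x ∈ arr, x.1 ≠ 1)
instance (arr : List (Int × Int)) : Decidable (Pre_FinD arr) := by unfold Pre_FinD; infer_instance
def pvWitness_FinD : (List (Int × Int)) := [(1, 5), (2, 7), (1, 3)]

def Spec_FinD (arr : List (Int × Int)) (out : Int × Int × Int × Int) : Prop := out = FinD_alt arr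
instance (arr : List (Int × Int)) (out : Int × Int × Int × Int) : Decidable (Spec_FinD arr out) := by unfold Spec_FinD; infer_instance

-- ===== CLAIM (what is proved, stated in full; the proofs are below) =====
def Claim_equal_FinD : Prop := ∀ (arr : List (Int × Int)), Dom_FinD arr → Pre_FinD arr → Spec_FinD arr (FinD arr)

-- ===== LEMMAS AND PROOFS =====

-- A's partitioning loop is append-to-filter on each component.
theorem foldA_eq_filters (arr : List (Int × Int)) (o t : List (Int × Int)) :
    arr.foldl
      (fun (acc : List (Int × Int) × List (Int × Int)) x =>
        if x.1 = 1 then (acc.1 ++ [x], acc.2) else (acc.1, acc.2 ++ [x]))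
      (o, t)
    = (o ++ arr.filter (fun x => x.1 = 1), t ++ arr.filter (fun x => ¬ x.1 = 1)) := by
  induction arr generalizing o t with
  | nil => simp
  | cons a l ih =>
    by_cases h : a.1 = 1 <;> simp [h, ih]

-- B's single pass equals running the winner fold over each filtered group.
theorem foldB_eq_filters (arr : List (Int × Int)) (b1 b2 : Option (Int × Int)) :
    arr.foldl
      (fun (st : Option (Int × Int) × Option (Int × Int)) x =>
        if x.1 = 1 then (bStep st.1 x, st.2) else (st.1, bStep st.2 x))
      (b1, b2)
    = ((arr.filter (fun x => x.1 = 1)).foldl bStep b1,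
       (arr.filter (fun x => ¬ x.1 = 1)).foldl bStep b2) := by
  induction arr generalizing b1 b2 with
  | nil => simp
  | cons a l ih =>
    by_cases h : a.1 = 1 <;> simp [h, ih]

-- the winner fold IS PySem's first-max
theorem foldB_eq_max? (l : List (Int × Int)) :
    l.foldl bStep none = PySem.List.max? l (fun x => x.2) := by
  simp only [PySem.List.max?]
  congr 1
  funext b x
  cases b <;> simp [bStep]

-- ===== VERDICT (by name: the statement is the Claim_ definition above) =====
theorem FinD_spec : Claim_equal_FinD := by
  intro arr _ _
  show FinD arr = FinD_alt arr
  simp only [FinD, FinD_alt, foldA_eq_filters, foldB_eq_filters, foldB_eq_max?, List.nil_append]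
  rcases h1 : PySem.List.max? (arr.filter (fun x => x.1 = 1)) (fun x => x.2) with _ | ⟨s1, p1⟩ <;>
    rcases h2 : PySem.List.max? (arr.filter (fun x => ¬ x.1 = 1)) (fun x => x.2) with _ | ⟨s2, p2⟩ <;>
    simp only [h1, h2]
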